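-- pv_equiv track=rewrite | github.com/Qing-ui/ReCQC | ReCQC2.0(Hungarian/CarbonScoreProcess.py | _get_environment_atoms
-- ===== SOURCE A (Python) =====
-- from collections import Counter, deque
-- from typing import Dict, List, Tuple
--
-- def _get_environment_atoms(
--
--         root: int,
--         graph: Dict[int, List[int]],
--         max_level: int
-- ) -> List[int]:
--     """获取多级环境原子（带连接有效性检查）"""
--     visited = {root}
--     queue = deque([(root, 0)])
--     environment = []
--
--     while queue:
--         current_atom, current_level = queue.popleft()
--         if current_level >= max_level:
--             continue
--
--         for neighbor in graph.get(current_atom, []):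
--             if neighbor not in visited:
--                 visited.add(neighbor)
--                 environment.append(neighbor)
--                 queue.append((neighbor, current_level + 1))
--     return environment
-- ===== SOURCE B (Python) =====
-- def _get_environment_atoms(root, graph, max_level):
--     """Recursion on levels with staged passes: flatten frontier adjacency lists,
--     then ordered-dedup against visited; per-level blocks concatenated."""
--     def expand(frontier, visited, levels_left):
--         if levels_left <= 0 or not frontier:
--             return []
--         candidates = [nb for atom in frontier for nb in graph.get(atom, [])]
--         seen = set(visited)
--         new = []
--         for nb in candidates:
--             if nb not in seen:
--                 seen.add(nb)
--                 new.append(nb)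
--         return new + expand(new, seen, levels_left - 1)
--     return expand([root], {root}, max_level)
-- ===== Notes on version B (the rewrite author's own statement) =====
-- stated objective: alternative
-- what changed: Replaces A's single interleaved (node, level) deque loop with recursion on levels, where each level is computed in staged passes: flatten all frontier adjacency lists into one candidate list, then an ordered dedup against visited, and the per-level blocks are concatenated to form the result.
import Mathlib
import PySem

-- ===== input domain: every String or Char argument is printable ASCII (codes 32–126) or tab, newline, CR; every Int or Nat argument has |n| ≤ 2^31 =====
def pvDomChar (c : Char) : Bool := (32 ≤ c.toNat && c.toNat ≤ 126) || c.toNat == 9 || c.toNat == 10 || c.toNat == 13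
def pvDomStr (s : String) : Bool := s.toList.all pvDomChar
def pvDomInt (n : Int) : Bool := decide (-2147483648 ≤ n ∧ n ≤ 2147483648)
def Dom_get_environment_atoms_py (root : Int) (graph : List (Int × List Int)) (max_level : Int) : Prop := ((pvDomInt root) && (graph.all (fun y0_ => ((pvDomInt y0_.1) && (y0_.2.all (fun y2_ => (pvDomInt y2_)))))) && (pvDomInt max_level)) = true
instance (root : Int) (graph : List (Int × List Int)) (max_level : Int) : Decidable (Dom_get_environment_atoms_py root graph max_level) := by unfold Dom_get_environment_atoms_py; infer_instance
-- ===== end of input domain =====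

-- B replaces A's interleaved (node, level) deque loop with recursion on levels,
-- each level computed by staged passes (flatten adjacency lists, then ordered dedup);
-- same output, so this is an alternative decomposition, not a speedup.

-- ===== PORT A =====
-- termination-measure helpers for A's while-loop (cited by pvALoop's decreasing_by)
def pvAllNodes (graph : List (Int × List Int)) : List Int := graph.flatMap (fun p => p.2)

def pvUnvis (graph : List (Int × List Int)) (v : PySem.Set Int) : Nat :=
  ((pvAllNodes graph).filter (fun y => !(PySem.Set.contains v y))).length

-- the inner `for neighbor in graph.get(current_atom, [])` loop of A
def pvForNbrsA (l : Int) : List Int → PySem.Set Int → List Int → List (Int × Int) →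
    PySem.Set Int × List Int × List (Int × Int)
  | [], v, env, q => (v, env, q)
  | n :: ns, v, env, q =>
    if PySem.Set.contains v n then pvForNbrsA l ns v env q
    else pvForNbrsA l ns (PySem.Set.add v n) (env ++ [n]) (q ++ [(n, l + 1)])

theorem pvUnvis_add_lt (graph : List (Int × List Int)) (v : PySem.Set Int) (x : Int)
    (hx : x ∈ pvAllNodes graph) (hv : ¬ x ∈ v) :
    pvUnvis graph (PySem.Set.add v x) < pvUnvis graph v := by
  unfold pvUnvis
  rw [PySem.Set.add_of_not_mem hv]
  have hsub : ∀ y : Int, (!PySem.Set.contains (v ++ [x]) y) = ((fun z => !decide (z = x)) y && (!PySem.Set.contains v y)) := by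
    intro y; simp [PySem.Set.contains]; rw [Bool.and_comm]
  calc ((pvAllNodes graph).filter (fun y => !PySem.Set.contains (v ++ [x]) y)).length
      = (((pvAllNodes graph).filter (fun y => !PySem.Set.contains v y)).filter (fun z => !decide (z = x))).length := by
        rw [List.filter_filter]; congr 1; apply List.filter_congr; intro y _; exact hsub y
    _ < ((pvAllNodes graph).filter (fun y => !PySem.Set.contains v y)).length := by
        have hmem : x ∈ (pvAllNodes graph).filter (fun y => !PySem.Set.contains v y) := by
          rw [List.mem_filter]; refine ⟨hx, ?_⟩; simp [PySem.Set.contains, hv]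
        rcases List.mem_iff_append.mp hmem with ⟨s, t, heq⟩
        rw [heq]
        simp only [List.filter_append, List.filter_cons, List.length_append]
        have h1 := List.length_filter_le (fun z => !decide (z = x)) s
        have h2 := List.length_filter_le (fun z => !decide (z = x)) t
        simp [List.length_cons] at *
        omega

theorem pvForNbrsA_measure (graph : List (Int × List Int)) (l : Int) :
    ∀ (ns : List Int) (v : PySem.Set Int) (env : List Int) (q : List (Int × Int)),
    (∀ n ∈ ns, n ∈ pvAllNodes graph) →
    2 * pvUnvis graph (pvForNbrsA l ns v env q).1 + (pvForNbrsA l ns v env q).2.2.length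
      ≤ 2 * pvUnvis graph v + q.length
  | [], v, env, q, _ => by simp [pvForNbrsA]
  | n :: ns, v, env, q, hsub => by
    rw [pvForNbrsA]
    by_cases hmem : n ∈ v
    · have hc : PySem.Set.contains v n = true := by simp [PySem.Set.contains, hmem]
      rw [if_pos hc]
      exact pvForNbrsA_measure graph l ns v env q (fun m hm => hsub m (List.mem_cons_of_mem _ hm))
    · have hc : ¬ PySem.Set.contains v n = true := by simp [PySem.Set.contains, hmem]
      rw [if_neg hc]
      have ih := pvForNbrsA_measure graph l ns (PySem.Set.add v n) (env ++ [n]) (q ++ [(n, l + 1)])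
        (fun m hm => hsub m (List.mem_cons_of_mem _ hm))
      have hlt := pvUnvis_add_lt graph v n (hsub n (List.mem_cons_self)) hmem
      simp [List.length_append] at ih ⊢
      omega

-- A's while-loop over the deque of (atom, level) pairs
def pvALoop (graph : List (Int × List Int)) (maxl : Int) (q : List (Int × Int))
    (v : PySem.Set Int) (env : List Int) : List Int :=
  match q with
  | [] => env
  | (a, l) :: q' =>
    if maxl ≤ l then pvALoop graph maxl q' v env
    else
      pvALoop graph maxl (pvForNbrsA l (PySem.Dict.getD ⟨graph⟩ a []) v env q').2.2
        (pvForNbrsA l (PySem.Dict.getD ⟨graph⟩ a []) v env q').1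
        (pvForNbrsA l (PySem.Dict.getD ⟨graph⟩ a []) v env q').2.1
termination_by 2 * pvUnvis graph v + q.length
decreasing_by
  · simp
  · have hsub : ∀ n ∈ PySem.Dict.getD (PySem.Dict.mk graph) a [], n ∈ pvAllNodes graph := by
      intro n hn
      unfold pvAllNodes
      induction graph with
      | nil => simp [PySem.Dict.getD, PySem.Dict.get?] at hn
      | cons p rest ih =>
        rw [List.flatMap_cons]
        by_cases hk : p.1 == a
        · refine List.mem_append.mpr (Or.inl ?_)
          have : PySem.Dict.getD (PySem.Dict.mk (p :: rest)) a [] = p.2 := by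
            simp [PySem.Dict.getD, PySem.Dict.get?, hk]
          rw [this] at hn; exact hn
        · refine List.mem_append.mpr (Or.inr ?_)
          have : PySem.Dict.getD (PySem.Dict.mk (p :: rest)) a [] = PySem.Dict.getD (PySem.Dict.mk rest) a [] := by
            simp [PySem.Dict.getD, PySem.Dict.get?, hk]
          rw [this] at hn; exact ih hn
    have hb := pvForNbrsA_measure graph l (PySem.Dict.getD ⟨graph⟩ a []) v env q' hsub
    simp at hb ⊢
    omega

def get_environment_atoms_py (root : Int) (graph : List (Int × List Int)) (max_level : Int) : List Int :=
  pvALoop graph max_level [(root, 0)] (PySem.Set.ofList [root]) []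

-- ===== PORT B =====
-- the comprehension `[nb for atom in frontier for nb in graph.get(atom, [])]`
def pvCandidates (graph : List (Int × List Int)) (frontier : List Int) : List Int :=
  frontier.flatMap (fun a => PySem.Dict.getD ⟨graph⟩ a [])

-- the `for nb in candidates` ordered-dedup loop of B; state: (seen, new)
def pvDedupB : List Int → PySem.Set Int → List Int → PySem.Set Int × List Int
  | [], seen, new => (seen, new)
  | nb :: cs, seen, new =>
    if PySem.Set.contains seen nb then pvDedupB cs seen new
    else pvDedupB cs (PySem.Set.add seen nb) (new ++ [nb])

-- B's recursive `expand`; `levels_left <= 0` becomes fuel 0 via Int.toNat at the call site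
def pvExpand (graph : List (Int × List Int)) : Nat → List Int → PySem.Set Int → List Int
  | 0, _, _ => []
  | k + 1, frontier, visited =>
    if frontier = [] then []
    else
      (pvDedupB (pvCandidates graph frontier) visited []).2 ++
        pvExpand graph k (pvDedupB (pvCandidates graph frontier) visited []).2
          (pvDedupB (pvCandidates graph frontier) visited []).1

def get_environment_atoms_py_alt (root : Int) (graph : List (Int × List Int)) (max_level : Int) : List Int :=
  pvExpand graph max_level.toNat [root] (PySem.Set.ofList [root])

-- ===== PRECONDITION & SPEC =====
def Spec_get_environment_atoms_py (root : Int) (graph : List (Int × List Int)) (max_level : Int) (out : List Int) : Prop := out = get_environment_atoms_py_alt root graph max_level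
instance (root : Int) (graph : List (Int × List Int)) (max_level : Int) (out : List Int) : Decidable (Spec_get_environment_atoms_py root graph max_level out) := by unfold Spec_get_environment_atoms_py; infer_instance

-- ===== CLAIM =====
def Claim_equal_get_environment_atoms_py : Prop := ∀ (root : Int) (graph : List (Int × List Int)) (max_level : Int), Dom_get_environment_atoms_py root graph max_level → Spec_get_environment_atoms_py root graph max_level (get_environment_atoms_py root graph max_level)

-- ===== LEMMAS AND PROOFS =====

-- specification of an ordered dedup scan: final seen set and the newly accepted atoms, in order
def pvNewN : List Int → PySem.Set Int → PySem.Set Int × List Int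
  | [], v => (v, [])
  | n :: ns, v =>
    if PySem.Set.contains v n then pvNewN ns v
    else ((pvNewN ns (PySem.Set.add v n)).1, n :: (pvNewN ns (PySem.Set.add v n)).2)

-- specification of one whole level as A performs it (atom by atom)
def pvNewF (graph : List (Int × List Int)) : List Int → PySem.Set Int → PySem.Set Int × List Int
  | [], v => (v, [])
  | a :: atoms, v =>
    ((pvNewF graph atoms (pvNewN (PySem.Dict.getD ⟨graph⟩ a []) v).1).1,
     (pvNewN (PySem.Dict.getD ⟨graph⟩ a []) v).2 ++
       (pvNewF graph atoms (pvNewN (PySem.Dict.getD ⟨graph⟩ a []) v).1).2)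

theorem pvForNbrsA_eq (l : Int) (ns : List Int) : ∀ (v : PySem.Set Int) (env : List Int) (q : List (Int × Int)),
    pvForNbrsA l ns v env q
      = ((pvNewN ns v).1, env ++ (pvNewN ns v).2, q ++ (pvNewN ns v).2.map (fun n => (n, l + 1))) := by
  induction ns with
  | nil => intro v env q; simp [pvForNbrsA, pvNewN]
  | cons n ns ih =>
    intro v env q
    rw [pvForNbrsA, pvNewN]
    by_cases hc : PySem.Set.contains v n = true
    · rw [if_pos hc, if_pos hc, ih]
    · rw [if_neg hc, if_neg hc, ih]
      simp

theorem pvDedupB_eq (cs : List Int) : ∀ (seen : PySem.Set Int) (new : List Int),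
    pvDedupB cs seen new = ((pvNewN cs seen).1, new ++ (pvNewN cs seen).2) := by
  induction cs with
  | nil => intro seen new; simp [pvDedupB, pvNewN]
  | cons n cs ih =>
    intro seen new
    rw [pvDedupB, pvNewN]
    by_cases hc : PySem.Set.contains seen n = true
    · rw [if_pos hc, if_pos hc, ih]
    · rw [if_neg hc, if_neg hc, ih]
      simp

theorem pvNewN_append (xs ys : List Int) : ∀ (v : PySem.Set Int),
    pvNewN (xs ++ ys) v
      = ((pvNewN ys (pvNewN xs v).1).1, (pvNewN xs v).2 ++ (pvNewN ys (pvNewN xs v).1).2) := by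
  induction xs with
  | nil => intro v; simp [pvNewN]
  | cons x xs ih =>
    intro v
    rw [List.cons_append, pvNewN, pvNewN]
    by_cases hc : PySem.Set.contains v x = true
    · rw [if_pos hc, if_pos hc, ih]
    · rw [if_neg hc, if_neg hc, ih]
      simp

-- one level as A does it equals one staged pass as B does it
theorem pvNewF_eq_flat (graph : List (Int × List Int)) (atoms : List Int) :
    ∀ (v : PySem.Set Int), pvNewF graph atoms v = pvNewN (pvCandidates graph atoms) v := by
  induction atoms with
  | nil => intro v; simp [pvNewF, pvCandidates, pvNewN]
  | cons a atoms ih =>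
    intro v
    rw [pvNewF, ih]
    have : pvCandidates graph (a :: atoms)
        = PySem.Dict.getD ⟨graph⟩ a [] ++ pvCandidates graph atoms := by
      simp [pvCandidates]
    rw [this, pvNewN_append]

theorem pvALoop_drain (graph : List (Int × List Int)) (maxl : Int) :
    ∀ (q : List (Int × Int)) (v : PySem.Set Int) (env : List Int),
    (∀ p ∈ q, maxl ≤ p.2) → pvALoop graph maxl q v env = env := by
  intro q
  induction q with
  | nil => intro v env _; rw [pvALoop]
  | cons p q ih =>
    intro v env hq
    obtain ⟨a, l⟩ := p
    rw [pvALoop, if_pos (hq (a, l) List.mem_cons_self)]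
    exact ih v env (fun p hp => hq p (List.mem_cons_of_mem _ hp))

theorem pvALoop_level (graph : List (Int × List Int)) (maxl l : Int) (hl : l < maxl) :
    ∀ (atoms : List Int) (next : List Int) (v : PySem.Set Int) (env : List Int),
    pvALoop graph maxl (atoms.map (fun a => (a, l)) ++ next.map (fun a => (a, l + 1))) v env
      = pvALoop graph maxl ((next ++ (pvNewF graph atoms v).2).map (fun a => (a, l + 1)))
          (pvNewF graph atoms v).1 (env ++ (pvNewF graph atoms v).2) := by
  intro atoms
  induction atoms with
  | nil => intro next v env; simp [pvNewF]
  | cons a atoms ih =>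
    intro next v env
    rw [List.map_cons, List.cons_append, pvALoop, if_neg (by omega), pvForNbrsA_eq]
    have hq : (atoms.map (fun a => (a, l)) ++ next.map (fun a => (a, l + 1)))
        ++ (pvNewN (PySem.Dict.getD ⟨graph⟩ a []) v).2.map (fun n => (n, l + 1))
        = atoms.map (fun a => (a, l)) ++ (next ++ (pvNewN (PySem.Dict.getD ⟨graph⟩ a []) v).2).map (fun a => (a, l + 1)) := by
      simp
    rw [hq, ih]
    rw [pvNewF]
    simp

theorem pvALoop_eq_expand (graph : List (Int × List Int)) (maxl : Int) :
    ∀ (k : Nat) (l : Int) (f : List Int) (v : PySem.Set Int) (env : List Int),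
    (maxl - l).toNat = k →
    pvALoop graph maxl (f.map (fun a => (a, l))) v env = env ++ pvExpand graph k f v := by
  intro k
  induction k with
  | zero =>
    intro l f v env hk
    rw [pvExpand, List.append_nil]
    apply pvALoop_drain
    intro p hp
    rcases List.mem_map.mp hp with ⟨a, _, rfl⟩
    simp
    omega
  | succ j ih =>
    intro l f v env hk
    rw [pvExpand]
    by_cases hf : f = []
    · subst hf
      rw [List.map_nil, pvALoop]
      simp
    · rw [if_neg hf, pvDedupB_eq, ← pvNewF_eq_flat]
      have h1 : pvALoop graph maxl (f.map (fun a => (a, l))) v env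
          = pvALoop graph maxl ((pvNewF graph f v).2.map (fun a => (a, l + 1)))
              (pvNewF graph f v).1 (env ++ (pvNewF graph f v).2) := by
        have := pvALoop_level graph maxl l (by omega) f [] v env
        simpa using this
      rw [h1, ih (l + 1) (pvNewF graph f v).2 (pvNewF graph f v).1
        (env ++ (pvNewF graph f v).2) (by omega)]
      simp

-- ===== VERDICT =====
theorem get_environment_atoms_py_spec : Claim_equal_get_environment_atoms_py := by
  intro root graph max_level _
  unfold Spec_get_environment_atoms_py get_environment_atoms_py get_environment_atoms_py_alt
  have h0 : ([(root, (0 : Int))] : List (Int × Int)) = [root].map (fun a => (a, (0 : Int))) := rfl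
  rw [h0]
  have := pvALoop_eq_expand graph max_level max_level.toNat 0
    [root] (PySem.Set.ofList [root]) [] (by omega)
  simpa using this
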